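-- pv_equiv track=rewrite | github.com/NehalH/Raisin | level_2.py | decode_L2
-- ===== SOURCE A (Python) =====
-- def decode_L2(bin_str, codes_dict):
--     reversed_codes_dict = {v: k for k, v in codes_dict.items()}
--     decoded_str = ""
--     curr_code = ""
--     i = 0
--
--     while i < len(bin_str):
--         curr_code += bin_str[i]
--         if curr_code in reversed_codes_dict:
--             decoded_str += reversed_codes_dict[curr_code]
--             curr_code = ""
--         i += 1
--
--     return decoded_str
-- ===== SOURCE B (Python) =====
-- def decode_L2(bin_str, codes_dict):
--     # Jump decoding: at each position probe only the distinct code lengths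
--     # (ascending, so the shortest matching code wins) and jump past the match.
--     m = {code: sym for sym, code in codes_dict.items()}
--     lengths = sorted({len(code) for code in m if code})
--     out = []
--     i = 0
--     n = len(bin_str)
--     while i < n:
--         sym = None
--         for L in lengths:
--             if L > n - i:
--                 break
--             chunk = bin_str[i:i + L]
--             if chunk in m:
--                 sym = m[chunk]
--                 i += L
--                 break
--         if sym is None:
--             break
--         out.append(sym)
--     return ''.join(out)
-- ===== Notes on version B (the rewrite author's own statement) =====
-- stated objective: faster
-- what changed: Replaces A's bit-by-bit growing-prefix membership loop with jump decoding: B precomputes the sorted set of distinct code lengths and, at each position, probes only slices of those lengths (ascending, so the shortest match wins), jumping past each matched code and stopping early when no code can match.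
import Mathlib
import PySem

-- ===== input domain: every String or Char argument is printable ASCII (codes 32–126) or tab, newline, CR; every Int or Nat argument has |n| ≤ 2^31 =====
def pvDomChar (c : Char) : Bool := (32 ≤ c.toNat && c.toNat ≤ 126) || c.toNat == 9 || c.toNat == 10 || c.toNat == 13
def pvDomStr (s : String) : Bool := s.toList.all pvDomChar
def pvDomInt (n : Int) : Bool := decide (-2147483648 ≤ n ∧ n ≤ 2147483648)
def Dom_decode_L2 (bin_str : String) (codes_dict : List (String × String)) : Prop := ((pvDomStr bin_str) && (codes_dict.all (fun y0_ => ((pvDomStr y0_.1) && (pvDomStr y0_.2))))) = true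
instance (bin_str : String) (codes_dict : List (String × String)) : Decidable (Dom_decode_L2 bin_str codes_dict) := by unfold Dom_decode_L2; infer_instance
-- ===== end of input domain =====

-- B replaces A's bit-by-bit growing-prefix membership loop by jump decoding: it probes, at each
-- position, only the distinct code lengths (ascending, so the shortest match wins) and jumps
-- past the matched code; same return value everywhere, no side effects involved.

-- ===== PORT A =====
-- while i < len(bin_str): curr_code += bin_str[i]; if curr_code in reversed: emit, reset
def goA (d : PySem.Dict (List Char) String) : List Char → String → List Char → String
  | [], dec, _ => dec
  | c :: rest, dec, curr =>
    let curr' := curr ++ [c]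
    match d.get? curr' with
    | some s => goA d rest (dec ++ s) []
    | none   => goA d rest dec curr'

def decode_L2 (bin_str : String) (codes_dict : List (String × String)) : String :=
  -- codes_dict is a Python dict: its items are the key-deduplicated pairs (PySem.Dict.ofList)
  let items := (PySem.Dict.ofList codes_dict).items
  -- reversed_codes_dict = {v: k for k, v in codes_dict.items()}
  let d := items.foldl (fun acc kv => acc.insert kv.2.toList kv.1) PySem.Dict.empty
  goA d bin_str.toList "" []

-- ===== PORT B =====
-- for L in lengths: if L > n - i: break; chunk = bin_str[i:i+L]; if chunk in m: ... break
def probeB (m : PySem.Dict (List Char) String) (r : List Char) : List Nat → Option (String × Nat)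
  | [] => none
  | L :: Ls =>
    if r.length < L then none
    else
      match m.get? (r.take L) with
      | some s => some (s, L)
      | none => probeB m r Ls

-- while i < n: probe; if sym is None: break; append, advance  (fuel = remaining length bounds the loop)
def goB (m : PySem.Dict (List Char) String) (lengths : List Nat) : Nat → List Char → String → String
  | 0, _, out => out
  | fuel+1, r, out =>
    match r with
    | [] => out
    | _ :: _ =>
      match probeB m r lengths with
      | some (s, L) => goB m lengths fuel (r.drop L) (out ++ s)
      | none => out

def decode_L2_alt (bin_str : String) (codes_dict : List (String × String)) : String :=
  let items := (PySem.Dict.ofList codes_dict).items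
  -- m = {code: sym for sym, code in codes_dict.items()}
  let m := items.foldl (fun acc kv => acc.insert kv.2.toList kv.1) PySem.Dict.empty
  -- lengths = sorted({len(code) for code in m if code})
  let lengths := PySem.List.sorted
    (PySem.Set.ofList ((m.keys.filter (fun k => !k.isEmpty)).map List.length)) (fun x => x) false
  goB m lengths bin_str.toList.length bin_str.toList ""

-- ===== PRECONDITION & SPEC =====
def Spec_decode_L2 (bin_str : String) (codes_dict : List (String × String)) (out : String) : Prop := out = decode_L2_alt bin_str codes_dict
instance (bin_str : String) (codes_dict : List (String × String)) (out : String) : Decidable (Spec_decode_L2 bin_str codes_dict out) := by unfold Spec_decode_L2; infer_instance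

-- ===== CLAIM (what is proved, stated in full; the proofs are below) =====
def Claim_equal_decode_L2 : Prop := ∀ (bin_str : String) (codes_dict : List (String × String)), Dom_decode_L2 bin_str codes_dict → Spec_decode_L2 bin_str codes_dict (decode_L2 bin_str codes_dict)

-- ===== LEMMAS AND PROOFS =====

-- the first (shortest) code match in the stream: index after the reset point, and the symbol
def firstMatch (m : PySem.Dict (List Char) String) : List Char → List Char → Option (Nat × String)
  | _, [] => none
  | curr, c :: r =>
    match m.get? (curr ++ [c]) with
    | some s => some (1, s)
    | none => (firstMatch m (curr ++ [c]) r).map (fun p => (p.1 + 1, p.2))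

theorem A_run (d : PySem.Dict (List Char) String) :
    ∀ (rest curr : List Char) (dec : String),
    goA d rest dec curr = match firstMatch d curr rest with
      | some (j, s) => goA d (rest.drop j) (dec ++ s) []
      | none => dec := by
  intro rest
  induction rest with
  | nil => intro curr dec; rfl
  | cons c r ih =>
    intro curr dec
    show (match d.get? (curr ++ [c]) with
          | some s => goA d r (dec ++ s) []
          | none   => goA d r dec (curr ++ [c])) = _
    rw [firstMatch]
    cases h : d.get? (curr ++ [c]) with
    | some s => rfl
    | none =>
      rw [ih (curr ++ [c]) dec]
      cases firstMatch d (curr ++ [c]) r with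
      | none => rfl
      | some p => rfl

theorem fm_eq_none_iff (m : PySem.Dict (List Char) String) :
    ∀ (r curr : List Char),
    firstMatch m curr r = none ↔ ∀ j, 1 ≤ j → j ≤ r.length → m.get? (curr ++ r.take j) = none := by
  intro r
  induction r with
  | nil =>
    intro curr
    simp [firstMatch]
    omega
  | cons c r ih =>
    intro curr
    rw [firstMatch]
    cases h : m.get? (curr ++ [c]) with
    | some s =>
      constructor
      · intro he; exact absurd he (by simp)
      · intro hall
        exfalso
        have h1 := hall 1 (by omega) (by simp)
        rw [show (c :: r).take 1 = [c] from rfl] at h1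
        rw [h] at h1
        exact absurd h1 (by simp)
    | none =>
      simp only [Option.map_eq_none_iff, ih (curr ++ [c])]
      constructor
      · intro hall j h1 hle
        match j, h1 with
        | 1, _ => simpa using h
        | (j'+2), _ =>
          have := hall (j'+1) (by omega) (by simpa using hle)
          simpa [List.append_assoc] using this
      · intro hall j h1 hle
        have := hall (j+1) (by omega) (by simpa using hle)
        simpa [List.append_assoc] using this

theorem fm_eq_some_iff (m : PySem.Dict (List Char) String) :
    ∀ (r curr : List Char) (j : Nat) (s : String),
    firstMatch m curr r = some (j, s) ↔
      (1 ≤ j ∧ j ≤ r.length ∧ m.get? (curr ++ r.take j) = some s ∧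
        ∀ j', 1 ≤ j' → j' < j → m.get? (curr ++ r.take j') = none) := by
  intro r
  induction r with
  | nil =>
    intro curr j s
    simp [firstMatch]
    omega
  | cons c r ih =>
    intro curr j s
    rw [firstMatch]
    cases h : m.get? (curr ++ [c]) with
    | some s0 =>
      constructor
      · intro he
        have hj : 1 = j ∧ s0 = s := by simpa [Prod.ext_iff] using he
        obtain ⟨hj1, hs⟩ := hj
        subst hs
        refine ⟨by omega, by rw [← hj1]; simp, ?_, ?_⟩
        · rw [← hj1, show (c :: r).take 1 = [c] from rfl]; exact h
        · intro j' ha hb; omega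
      · rintro ⟨h1, h2, h3, h4⟩
        match j, h1 with
        | 1, _ =>
          rw [show (c :: r).take 1 = [c] from rfl] at h3
          rw [h] at h3
          have hs : s0 = s := by simpa using h3
          simp [hs]
        | (j0+2), _ =>
          have := h4 1 (by omega) (by omega)
          rw [show (c :: r).take 1 = [c] from rfl] at this
          rw [h] at this
          exact absurd this (by simp)
    | none =>
      constructor
      · intro he
        simp only [Option.map_eq_some_iff] at he
        obtain ⟨⟨j0, s1⟩, hfm, hpair⟩ := he
        obtain ⟨h1, h2⟩ : j0 + 1 = j ∧ s1 = s := by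
          simpa using hpair
        subst h1; subst h2
        obtain ⟨ha, hb, hc, hd⟩ := (ih (curr ++ [c]) j0 s1).1 hfm
        refine ⟨by omega, by simpa using hb, by simpa [List.append_assoc] using hc, ?_⟩
        intro j' h1' hlt
        match j', h1' with
        | 1, _ => simpa using h
        | (j''+2), _ =>
          have := hd (j''+1) (by omega) (by omega)
          simpa [List.append_assoc] using this
      · rintro ⟨h1, h2, h3, h4⟩
        match j, h1 with
        | 1, _ =>
          rw [show (c :: r).take 1 = [c] by simp] at h3
          rw [h3] at h
          exact absurd h (by simp)
        | (j0+2), _ =>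
          have hfm : firstMatch m (curr ++ [c]) r = some (j0 + 1, s) := by
            refine (ih (curr ++ [c]) (j0 + 1) s).2 ⟨by omega, by simp at h2; omega, ?_, ?_⟩
            · simpa [List.append_assoc] using h3
            · intro j' ha hb
              have := h4 (j' + 1) (by omega) (by omega)
              simpa [List.append_assoc] using this
          rw [hfm]
          rfl

theorem probe_aux (m : PySem.Dict (List Char) String) (r : List Char) :
    ∀ (Ls : List Nat), Ls.Pairwise (· < ·) → (∀ L ∈ Ls, 1 ≤ L) →
    (∀ j, 1 ≤ j → j ≤ r.length → m.get? (r.take j) ≠ none → j ∈ Ls) →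
    probeB m r Ls = (firstMatch m [] r).map (fun p => (p.2, p.1)) := by
  intro Ls
  induction Ls with
  | nil =>
    intro _ _ hc
    have : firstMatch m [] r = none := by
      rw [fm_eq_none_iff]
      intro j h1 h2
      by_contra hne
      exact absurd (hc j h1 h2 (by simpa using hne)) (by simp)
    rw [probeB, this]; rfl
  | cons L Ls ih =>
    intro hpw hpos hc
    obtain ⟨hL, hpw'⟩ := List.pairwise_cons.1 hpw
    rw [probeB]
    by_cases hlen : r.length < L
    · rw [if_pos hlen]
      have : firstMatch m [] r = none := by
        rw [fm_eq_none_iff]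
        intro j h1 h2
        by_contra hne
        have hj := hc j h1 h2 (by simpa using hne)
        rcases List.mem_cons.1 hj with rfl | hmem
        · omega
        · have := hL j hmem; omega
      rw [this]; rfl
    · rw [if_neg hlen]
      cases hm : m.get? (r.take L) with
      | some s =>
        have : firstMatch m [] r = some (L, s) := by
          rw [fm_eq_some_iff]
          refine ⟨hpos L (by simp), by omega, by simpa using hm, ?_⟩
          intro j' h1 hlt
          by_contra hne
          have hj := hc j' h1 (by omega) (by simpa using hne)
          rcases List.mem_cons.1 hj with rfl | hmem
          · omega
          · have := hL j' hmem; omega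
        rw [this]; rfl
      | none =>
        rw [ih hpw' (fun x hx => hpos x (by simp [hx])) ?_]
        intro j h1 h2 hne
        have hj := hc j h1 h2 hne
        rcases List.mem_cons.1 hj with rfl | hmem
        · exact absurd (by simpa using hm) hne
        · exact hmem

theorem main_eq (m : PySem.Dict (List Char) String) (lengths : List Nat)
    (hpw : lengths.Pairwise (· < ·)) (hpos : ∀ L ∈ lengths, 1 ≤ L)
    (hcomp : ∀ (w : List Char) (s : String), m.get? w = some s → w ≠ [] → w.length ∈ lengths) :
    ∀ (fuel : Nat) (r : List Char) (dec : String), r.length ≤ fuel →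
    goA m r dec [] = goB m lengths fuel r dec := by
  intro fuel
  induction fuel with
  | zero =>
    intro r dec hle
    have : r = [] := List.eq_nil_of_length_eq_zero (by omega)
    subst this; rfl
  | succ fuel ih =>
    intro r dec hle
    cases r with
    | nil => rfl
    | cons c r' =>
      have hc : ∀ j, 1 ≤ j → j ≤ (c :: r').length → m.get? ((c :: r').take j) ≠ none → j ∈ lengths := by
        intro j h1 h2 hne
        cases hg : m.get? ((c :: r').take j) with
        | none => exact absurd hg hne
        | some s =>
          have := hcomp _ _ hg (by
            intro hemp
            have : ((c :: r').take j).length = 0 := by rw [hemp]; rfl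
            rw [List.length_take] at this
            omega)
          rwa [List.length_take, min_eq_left (by omega)] at this
      rw [goB]
      show goA m (c :: r') dec [] =
        (match probeB m (c :: r') lengths with
         | some (s, L) => goB m lengths fuel ((c :: r').drop L) (dec ++ s)
         | none => dec)
      rw [probe_aux m (c :: r') lengths hpw hpos hc]
      rw [A_run m (c :: r') [] dec]
      cases hfm : firstMatch m [] (c :: r') with
      | none => rfl
      | some p =>
        obtain ⟨j, s⟩ := p
        have hj := (fm_eq_some_iff m (c :: r') [] j s).1 hfm
        show goA m ((c :: r').drop j) (dec ++ s) [] = goB m lengths fuel ((c :: r').drop j) (dec ++ s)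
        exact ih _ _ (by rw [List.length_drop]; omega)

theorem pairwise_lt_of_le_nodup (l : List Nat) (h : l.Pairwise (· ≤ ·)) (hn : l.Nodup) :
    l.Pairwise (· < ·) :=
  (h.and hn).imp (fun ⟨a, b⟩ => lt_of_le_of_ne a b)

theorem decode_agrees (bin_str : String) (codes_dict : List (String × String)) :
    decode_L2 bin_str codes_dict = decode_L2_alt bin_str codes_dict := by
  unfold decode_L2 decode_L2_alt
  set m := ((PySem.Dict.ofList codes_dict).items).foldl
    (fun acc kv => acc.insert kv.2.toList kv.1) PySem.Dict.empty with hm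
  set S := PySem.Set.ofList ((m.keys.filter (fun k => !k.isEmpty)).map List.length) with hS
  set lengths := PySem.List.sorted S (fun x => x) false with hlen
  have hmemlen : ∀ L, L ∈ lengths ↔ L ∈ ((m.keys.filter (fun k => !k.isEmpty)).map List.length) := by
    intro L
    rw [hlen, PySem.List.mem_sorted, hS, PySem.Set.mem_ofList]
  have hpw : lengths.Pairwise (· < ·) := by
    apply pairwise_lt_of_le_nodup
    · exact PySem.List.sorted_pairwise S (fun x => x) 
    · exact (PySem.List.sorted_perm S (fun x => x) false).nodup_iff.2 (PySem.Set.nodup_ofList _)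
  have hpos : ∀ L ∈ lengths, 1 ≤ L := by
    intro L hL
    rw [hmemlen] at hL
    obtain ⟨w, hw, rfl⟩ := List.mem_map.1 hL
    have := (List.mem_filter.1 hw).2
    have hne : w ≠ [] := by simpa using this
    cases w with
    | nil => exact absurd rfl hne
    | cons a b => simp
  have hcomp : ∀ (w : List Char) (s : String), m.get? w = some s → w ≠ [] → w.length ∈ lengths := by
    intro w s hg hne
    have hk : w ∈ m.keys := by
      by_contra hnk
      rw [← PySem.Dict.get?_eq_none_iff_not_mem_keys] at hnk
      rw [hg] at hnk
      exact absurd hnk (by simp)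
    rw [hmemlen]
    exact List.mem_map.2 ⟨w, List.mem_filter.2 ⟨hk, by simpa using hne⟩, rfl⟩
  exact main_eq m lengths hpw hpos hcomp bin_str.toList.length bin_str.toList "" (le_refl _)

-- ===== VERDICT (by name: the statement is the Claim_ definition above) =====
theorem decode_L2_spec : Claim_equal_decode_L2 := by
  intro bin_str codes_dict _
  exact decode_agrees bin_str codes_dict
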